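-- pv_equiv track=rewrite | github.com/lolmomarchal/Alignment-CSE185-SP24- | src/seedAndExtend.py | calculate_md_tag
-- ===== SOURCE A (Python) =====
-- def calculate_md_tag(aligned_query, aligned_ref):
--     md_tag = ""
--     matches = 0
--     for q, r in zip(aligned_query, aligned_ref):
--         if q == r:
--             matches += 1
--         else:
--             if matches > 0:
--                 md_tag += str(matches)
--             md_tag += r
--             matches = 0
--     if matches > 0:
--         md_tag += str(matches)
--     return md_tag
-- ===== SOURCE B (Python) =====
-- def calculate_md_tag(aligned_query, aligned_ref):
--     pairs = list(zip(aligned_query, aligned_ref))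
--     n = len(pairs)
--     pieces = []
--     i = 0
--     while i < n:
--         q, r = pairs[i]
--         if q == r:
--             j = i + 1
--             while j < n and pairs[j][0] == pairs[j][1]:
--                 j += 1
--             pieces.append(str(j - i))
--             i = j
--         else:
--             pieces.append(r)
--             i += 1
--     return "".join(pieces)
-- ===== Notes on version B (the rewrite author's own statement) =====
-- stated objective: alternative
-- what changed: Replaced A's single pass with a running match counter flushed at each mismatch by a group-first scan: each maximal run of matches is measured with an inner scan and emitted as one piece, mismatches emit their ref char, and the pieces are joined at the end.
import Mathlib
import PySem

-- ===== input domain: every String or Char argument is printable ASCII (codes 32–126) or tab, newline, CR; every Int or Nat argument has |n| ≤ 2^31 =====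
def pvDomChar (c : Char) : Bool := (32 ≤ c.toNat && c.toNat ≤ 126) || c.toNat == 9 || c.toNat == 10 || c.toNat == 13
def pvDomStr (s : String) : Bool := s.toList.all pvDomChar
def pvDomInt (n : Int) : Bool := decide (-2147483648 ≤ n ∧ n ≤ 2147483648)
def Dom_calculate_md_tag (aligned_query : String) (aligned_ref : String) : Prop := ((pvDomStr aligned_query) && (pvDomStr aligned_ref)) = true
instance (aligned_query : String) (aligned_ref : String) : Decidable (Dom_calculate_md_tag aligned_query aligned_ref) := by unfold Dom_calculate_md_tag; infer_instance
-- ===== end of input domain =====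

-- B builds the MD tag group-first (measure each maximal match run, join pieces) instead of A's running counter flushed at each mismatch; alternative decomposition, same cost.

-- ===== PORT A =====
-- loop body of A: state is (md_tag, matches)
def pvAStep (st : String × Int) (p : Char × Char) : String × Int :=
  if p.1 == p.2 then (st.1, st.2 + 1)
  else ((if st.2 > 0 then st.1 ++ PySem.Int.toStr st.2 else st.1) ++ p.2.toString, 0)

def calculate_md_tag (aligned_query : String) (aligned_ref : String) : String :=
  let st := (aligned_query.toList.zip aligned_ref.toList).foldl pvAStep ("", 0)
  if st.2 > 0 then st.1 ++ PySem.Int.toStr st.2 else st.1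

-- ===== PORT B =====
def pvMatch (p : Char × Char) : Bool := p.1 == p.2

-- the pieces B collects: one length per maximal match run, one ref char per mismatch
def pvGroups : List (Char × Char) → List String
  | [] => []
  | (q, r) :: rest =>
    if q == r then
      PySem.Int.toStr (1 + (rest.takeWhile pvMatch).length : Int)
        :: pvGroups (rest.dropWhile pvMatch)
    else
      r.toString :: pvGroups rest
termination_by ps => ps.length
decreasing_by
  · have := List.length_dropWhile_le pvMatch rest
    simp; omega
  · simp

def calculate_md_tag_alt (aligned_query : String) (aligned_ref : String) : String :=
  PySem.Str.join "" (pvGroups (aligned_query.toList.zip aligned_ref.toList))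

-- ===== PRECONDITION & SPEC =====
def Spec_calculate_md_tag (aligned_query : String) (aligned_ref : String) (out : String) : Prop := out = calculate_md_tag_alt aligned_query aligned_ref
instance (aligned_query : String) (aligned_ref : String) (out : String) : Decidable (Spec_calculate_md_tag aligned_query aligned_ref out) := by unfold Spec_calculate_md_tag; infer_instance

-- ===== CLAIM (what is proved, stated in full; the proofs are below) =====
def Claim_equal_calculate_md_tag : Prop := ∀ (aligned_query : String) (aligned_ref : String), Dom_calculate_md_tag aligned_query aligned_ref → Spec_calculate_md_tag aligned_query aligned_ref (calculate_md_tag aligned_query aligned_ref)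

-- ===== LEMMAS AND PROOFS =====

-- A's loop, written as a recursion on the pair list with the counter as parameter
-- (the md_tag prefix is factored out)
def pvGo (m : Int) : List (Char × Char) → String
  | [] => if m > 0 then PySem.Int.toStr m else ""
  | (q, r) :: rest =>
    if q == r then pvGo (m + 1) rest
    else (if m > 0 then PySem.Int.toStr m else "") ++ r.toString ++ pvGo 0 rest

theorem intercalate_nil_flat {α : Type} (l : List (List α)) :
    List.intercalate [] l = l.flatten := by
  induction l with
  | nil => simp [List.intercalate]
  | cons x xs ih =>
    cases xs with
    | nil => simp [List.intercalate]
    | cons y ys =>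
      simp [List.intercalate, List.intersperse] at ih ⊢
      exact ih

theorem join_empty_nil : PySem.Str.join "" [] = "" := by decide

theorem join_empty_cons (x : String) (l : List String) :
    PySem.Str.join "" (x :: l) = x ++ PySem.Str.join "" l := by
  simp [PySem.Str.join, PySem.Chars.join, intercalate_nil_flat]

-- A's fold-then-flush equals prefix ++ pvGo
theorem foldl_aStep_eq_pvGo (ps : List (Char × Char)) :
    ∀ (s : String) (m : Int),
      (let st := ps.foldl pvAStep (s, m);
       if st.2 > 0 then st.1 ++ PySem.Int.toStr st.2 else st.1) = s ++ pvGo m ps := by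
  induction ps with
  | nil =>
    intro s m
    simp only [List.foldl_nil, pvGo]
    split_ifs <;> simp
  | cons p rest ih =>
    intro s m
    obtain ⟨q, r⟩ := p
    by_cases h : q == r
    · simp only [List.foldl_cons, pvAStep, h, if_pos, pvGo, ih]
    · simp only [List.foldl_cons, pvAStep, h, if_neg, Bool.false_eq_true,
        not_false_iff, pvGo, ih]
      split_ifs <;> simp [-String.append_singleton, String.append_assoc]

-- pushing pvGo's counter through a run of matches
theorem pvGo_run (t : List (Char × Char)) :
    ∀ (m : Int) (d : List (Char × Char)), (∀ p ∈ t, pvMatch p = true) →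
      pvGo m (t ++ d) = pvGo (m + t.length) d := by
  induction t with
  | nil => intro m d _; simp
  | cons p ts ih =>
    intro m d h
    obtain ⟨q, r⟩ := p
    have hm : (q == r) = true := h (q, r) (by simp)
    simp only [List.cons_append, pvGo, hm, if_pos]
    rw [ih (m + 1) d (fun p hp => h p (by simp [hp]))]
    congr 1
    simp only [List.length_cons]
    push_cast
    ring

-- main lemma: pvGo from a zero counter equals B's joined groups
theorem pvGo_zero_eq_join :
    ∀ (n : Nat) (ps : List (Char × Char)), ps.length ≤ n →
      pvGo 0 ps = PySem.Str.join "" (pvGroups ps) := by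
  intro n
  induction n with
  | zero =>
    intro ps hps
    have : ps = [] := List.eq_nil_of_length_eq_zero (Nat.le_zero.mp hps)
    subst this
    simp [pvGo, pvGroups, join_empty_nil]
  | succ n ih =>
    intro ps hps
    match ps with
    | [] => simp [pvGo, pvGroups, join_empty_nil]
    | (q, r) :: rest =>
      by_cases h : q == r
      · -- a match run starts: split rest into its match prefix and the remainder
        have hsplit : rest.takeWhile pvMatch ++ rest.dropWhile pvMatch = rest :=
          List.takeWhile_append_dropWhile
        have hall : ∀ p ∈ rest.takeWhile pvMatch, pvMatch p = true :=
          fun p hp => List.mem_takeWhile_imp hp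
        have h1 : pvGo 0 ((q, r) :: rest) =
            pvGo (1 + (rest.takeWhile pvMatch).length) (rest.dropWhile pvMatch) := by
          simp only [pvGo, h, if_pos]
          conv_lhs => rw [← hsplit]
          rw [pvGo_run _ _ _ hall]
          norm_num
        rw [h1]
        rw [pvGroups]
        simp only [h, if_pos, join_empty_cons]
        set M : Int := 1 + ((rest.takeWhile pvMatch).length : Int) with hM
        have hMpos : M > 0 := by positivity
        match hd : rest.dropWhile pvMatch with
        | [] =>
          simp [pvGo, hMpos, pvGroups, join_empty_nil]
        | (q', r') :: rest' =>
          have hq' : pvMatch (q', r') = false := by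
            have := List.head_dropWhile_not pvMatch (l := rest) (by simp [hd])
            simpa [hd] using this
          have hq'' : (q' == r') = false := hq'
          have hlen : rest'.length ≤ n := by
            have h2 := List.length_dropWhile_le pvMatch rest
            rw [hd] at h2
            simp at h2 hps
            omega
          simp only [pvGo, hq'', Bool.false_eq_true, if_neg, not_false_iff, hMpos, if_pos]
          rw [ih rest' hlen]
          rw [pvGroups]
          simp [hq'', join_empty_cons, -String.append_singleton, String.append_assoc]
      · -- mismatch at the head: one ref-char piece
        have hlen : rest.length ≤ n := by simp at hps; omega
        simp only [pvGo, h, Bool.false_eq_true, if_neg, not_false_iff]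
        rw [ih rest hlen]
        rw [pvGroups]
        simp [h, join_empty_cons, -String.append_singleton]

-- ===== VERDICT (by name: the statement is the Claim_ definition above) =====
theorem calculate_md_tag_spec : Claim_equal_calculate_md_tag := by
  intro aq ar _
  unfold Spec_calculate_md_tag calculate_md_tag calculate_md_tag_alt
  rw [foldl_aStep_eq_pvGo]
  rw [pvGo_zero_eq_join (aq.toList.zip ar.toList).length _ (le_refl _)]
  simp
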